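-- pv_equiv track=rewrite | github.com/brentyi/tyro | src/tyro/_strings.py | join_union_metavars
-- ===== SOURCE A (Python) =====
-- from typing import Iterable, List, Sequence, Tuple, Type
--
-- def join_union_metavars(metavars: Iterable[str]) -> str:
--     """Metavar generation helper for unions. Could be revisited.
--
--     Examples:
--         None, INT => NONE|INT
--         {0,1,2}, {3,4} => {0,1,2,3,4}
--         {0,1,2}, {3,4}, STR => {0,1,2,3,4}|STR
--         {None}, INT [INT ...] => {None}|{INT [INT ...]}
--         STR, INT [INT ...] => STR|{INT [INT ...]}
--         STR, INT INT => STR|{INT INT}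
--
--     The curly brackets are unfortunately overloaded but alternatives all interfere with
--     argparse internals.
--     """
--     metavars = tuple(metavars)
--     merged_metavars = [metavars[0]]
--     for i in range(1, len(metavars)):
--         prev = merged_metavars[-1]
--         curr = metavars[i]
--         if (
--             prev.startswith("{")
--             and prev.endswith("}")
--             and curr.startswith("{")
--             and curr.endswith("}")
--         ):
--             merged_metavars[-1] = prev[:-1] + "," + curr[1:]
--         else:
--             merged_metavars.append(curr)
--
--     for i, m in enumerate(merged_metavars):
--         if " " in m:
--             merged_metavars[i] = "{" + m + "}"
--
--     return "|".join(merged_metavars)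
-- ===== SOURCE B (Python) =====
-- def join_union_metavars(metavars):
--     """Boundary-flag algorithm: instead of building a list of merged metavars,
--     decide each inter-element separator (',' for a braced-braced boundary, '|'
--     otherwise), strip braces at merge boundaries, and emit the final string in
--     one pass; the wrap decision for a merge-run is precomputed by a backward
--     run_space scan."""
--     ms = list(metavars)
--     braced = [m.startswith("{") and m.endswith("}") for m in ms]
--     # merge[i]: element i merges with element i+1 (both fully braced)
--     merge = [a and b for a, b in zip(braced, braced[1:])] + [False]
--     # run_space[i]: some member of the merge-run extending right from i has a space
--     run_space = []
--     acc = False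
--     for m, mg in zip(reversed(ms), reversed(merge)):
--         acc = " " in m or (mg and acc)
--         run_space.append(acc)
--     run_space.reverse()
--     # merge_left[i]: element i is merged onto its predecessor
--     merge_left = [False] + merge[:-1]
--     pieces = []
--     w = False
--     for m, left, right, sp in zip(ms, merge_left, merge, run_space):
--         if left:
--             pieces.append(",")
--             t = m[1:]
--         else:
--             if pieces:
--                 pieces.append("|")
--             w = sp
--             if w:
--                 pieces.append("{")
--             t = m
--         if right:
--             t = t[:-1]
--         pieces.append(t)
--         if not right and w:
--             pieces.append("}")
--     return "".join(pieces)
-- ===== Notes on version B (the rewrite author's own statement) =====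
-- stated objective: alternative
-- what changed: Replaces A's merged-list construction (rewriting the accumulator's last element, then a wrapping pass, then join) with a boundary-flag algorithm: pairwise merge flags decide each separator (',' vs '|') and which braces to strip, a backward run_space scan precomputes the wrap decision per merge-run, and the final string is emitted directly in one forward pass with no intermediate merged list.
import Mathlib
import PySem

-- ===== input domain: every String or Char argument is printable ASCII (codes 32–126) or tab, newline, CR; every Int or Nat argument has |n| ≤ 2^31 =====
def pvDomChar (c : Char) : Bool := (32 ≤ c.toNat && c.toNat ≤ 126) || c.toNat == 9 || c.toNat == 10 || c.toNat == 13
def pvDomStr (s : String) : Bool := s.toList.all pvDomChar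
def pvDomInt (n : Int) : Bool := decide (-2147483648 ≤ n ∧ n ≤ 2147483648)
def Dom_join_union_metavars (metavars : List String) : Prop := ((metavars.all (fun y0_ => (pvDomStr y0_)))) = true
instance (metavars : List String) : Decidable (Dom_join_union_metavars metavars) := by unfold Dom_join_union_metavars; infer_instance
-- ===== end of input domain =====

-- B replaces A's merged-list construction with a boundary-flag algorithm (pairwise merge
-- flags decide separators and brace strips, a backward run_space scan decides wrapping,
-- one forward emission pass); on the empty list A raises IndexError, B returns "".

-- ===== PORT A =====
-- shared predicate: m.startswith("{") and m.endswith("}")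
def pvBraced (s : List Char) : Bool :=
  PySem.Chars.startswith s ['{'] && PySem.Chars.endswith s ['}']

-- shared test: " " in m
def pvHasSpace (m : List Char) : Bool := PySem.Chars.isIn [' '] m

-- prev[:-1] + "," + curr[1:]
def pvMergeA (prev curr : List Char) : List Char :=
  PySem.Chars.slice prev none (some (-1)) ++ [','] ++ PySem.Chars.slice curr (some 1) none

-- the space-wrapping pass: "{" + m + "}" if " " in m else m
def pvWrap (m : List Char) : List Char :=
  if pvHasSpace m then '{' :: m ++ ['}'] else m

-- A's loop keeps merged_metavars with the LAST element at the head (reversed accumulator)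
def pvStepA (acc : List (List Char)) (curr : List Char) : List (List Char) :=
  match acc with
  | [] => [curr]   -- unreachable: the accumulator starts nonempty
  | prev :: tl =>
    if pvBraced prev && pvBraced curr then pvMergeA prev curr :: tl
    else curr :: prev :: tl

def join_union_metavars (metavars : List String) : String :=
  match metavars.map String.toList with
  | [] => ""   -- Python raises IndexError here (metavars[0]); excluded by Pre_
  | m0 :: rest =>
    let mergedRev := rest.foldl pvStepA [m0]
    String.ofList (PySem.Chars.join ['|'] (mergedRev.reverse.map pvWrap))

-- ===== PORT B =====
-- merge = [a and b for a, b in zip(braced, braced[1:])] + [False]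
def pvMergeList (ms : List (List Char)) : List Bool :=
  (List.zipWith (· && ·) (ms.map pvBraced) (ms.map pvBraced).tail) ++ [false]

-- the backward run_space scan: for m, mg in zip(reversed(ms), reversed(merge)): acc = " " in m or (mg and acc)
def pvRSLoop : List (List Char × Bool) → Bool → List Bool
  | [], _ => []
  | (m, mg) :: rest, acc =>
    let acc' := pvHasSpace m || (mg && acc)
    acc' :: pvRSLoop rest acc'

-- the forward emission loop over zip(ms, merge_left, merge, run_space); pieces is the
-- Python list of string pieces (joined with "" at the end), w the current run's wrap flag
def pvEmitB : List (List Char × Bool × Bool × Bool) → List (List Char) → Bool → List (List Char)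
  | [], pieces, _ => pieces
  | (m, left, right, sp) :: rest, pieces, w =>
    let s : List (List Char) × Bool × List Char :=
      if left then (pieces ++ [[',']], w, m.tail)                -- t = m[1:]
      else
        let p1 := if pieces ≠ [] then pieces ++ [['|']] else pieces
        (if sp then p1 ++ [['{']] else p1, sp, m)
    let t := if right then s.2.2.dropLast else s.2.2             -- t = t[:-1]
    let p := s.1 ++ [t]
    pvEmitB rest (if !right && s.2.1 then p ++ [['}']] else p) s.2.1

def join_union_metavars_alt (metavars : List String) : String :=
  let ms := metavars.map String.toList
  let merge := pvMergeList ms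
  let runSpace := (pvRSLoop (ms.reverse.zip merge.reverse) false).reverse
  let mergeLeft := false :: merge.dropLast                       -- [False] + merge[:-1]
  String.ofList (pvEmitB (ms.zip (mergeLeft.zip (merge.zip runSpace))) [] false).flatten

-- ===== PRECONDITION & SPEC =====
-- A evaluates metavars[0]: the empty list (IndexError) is excluded; everything else is admitted.
def Pre_join_union_metavars (metavars : List String) : Prop := metavars ≠ []
instance (metavars : List String) : Decidable (Pre_join_union_metavars metavars) := by unfold Pre_join_union_metavars; infer_instance
def pvWitness_join_union_metavars : List String := ["{0,1}", "{None}", "INT [INT ...]"]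

def Spec_join_union_metavars (metavars : List String) (out : String) : Prop := out = join_union_metavars_alt metavars
instance (metavars : List String) (out : String) : Decidable (Spec_join_union_metavars metavars out) := by unfold Spec_join_union_metavars; infer_instance

-- ===== CLAIM (what is proved, stated in full; the proofs are below) =====
def Claim_equal_join_union_metavars : Prop := ∀ (metavars : List String), Dom_join_union_metavars metavars → Pre_join_union_metavars metavars → Spec_join_union_metavars metavars (join_union_metavars metavars)
-- ===== LEMMAS AND PROOFS =====

-- ---- proof-side vocabulary ----

def pvBracedHead : List (List Char) → Bool
  | [] => false
  | h :: _ => pvBraced h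

def pvInner (s : List Char) : List Char := s.tail.dropLast

-- A's merge loop, written as forward structural recursion
def pvMergeFrom (prev : List Char) : List (List Char) → List (List Char)
  | [] => [prev]
  | c :: cs =>
    if pvBraced prev && pvBraced c then pvMergeFrom (pvMergeA prev c) cs
    else prev :: pvMergeFrom c cs

def pvML : List (List Char) → List (List Char)
  | [] => []
  | h :: t => pvMergeFrom h t

-- the canonical result both programs compute
def pvTT (ms : List (List Char)) : List Char := PySem.Chars.join ['|'] ((pvML ms).map pvWrap)

-- tuple-stream vocabulary for B's emission loop
def pvSetL (b : Bool) : List (List Char × Bool × Bool × Bool) → List (List Char × Bool × Bool × Bool)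
  | [] => []
  | (m, _, r, s) :: rest => (m, b, r, s) :: rest

def pvRS4 : List (List Char × Bool × Bool × Bool) → Bool
  | [] => false
  | (_, _, _, s) :: _ => s

-- recursive characterisation of B's zipped tuple stream
def pvTup : List (List Char) → List (List Char × Bool × Bool × Bool)
  | [] => []
  | [x] => [(x, false, false, pvHasSpace x)]
  | x :: y :: r =>
    let R := pvBraced x && pvBraced y
    let t := pvTup (y :: r)
    (x, false, R, pvHasSpace x || (R && pvRS4 t)) :: pvSetL R t

-- B's pending continuation mid-run
def pvCont (w : Bool) : List (List Char) → List Char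
  | [] => []
  | p :: ms' =>
    if pvBraced p && pvBracedHead ms' then ',' :: pvInner p ++ pvCont w ms'
    else ',' :: p.tail ++ (if w then ['}'] else []) ++ (if ms' = [] then [] else '|' :: pvTT ms')

-- ---- A-side lemmas ----

lemma foldA_eq (rest : List (List Char)) : ∀ (prev : List Char) (tl : List (List Char)),
    List.foldl pvStepA (prev :: tl) rest = (pvMergeFrom prev rest).reverse ++ tl := by
  induction rest with
  | nil => intro prev tl; simp [pvMergeFrom]
  | cons c cs ih =>
    intro prev tl
    simp only [List.foldl_cons, pvStepA, pvMergeFrom]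
    by_cases h : pvBraced prev && pvBraced c
    · rw [if_pos h, if_pos h, ih]
    · rw [if_neg h, if_neg h, ih]
      simp

lemma mergeA_eq (p c : List Char) : pvMergeA p c = p.dropLast ++ ',' :: c.tail := by
  simp [pvMergeA, PySem.Chars.slice_eq_listSlice, PySem.List.slice_to_neg_one,
    PySem.List.slice_from_one]

lemma braced_decomp {s : List Char} (h : pvBraced s = true) :
    s = '{' :: pvInner s ++ ['}'] := by
  have hb := h
  rw [pvBraced, Bool.and_eq_true] at hb
  have h1 : ['{'] <+: s := (PySem.Chars.startswith_iff _ _).1 hb.1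
  have h2 : ['}'] <:+ s := (PySem.Chars.endswith_iff _ _).1 hb.2
  obtain ⟨u, hu⟩ := h1
  obtain ⟨w, hw⟩ := h2
  cases w with
  | nil =>
    exfalso
    have h3 : '{' :: u = ['}'] := by
      rw [← List.singleton_append]; exact hu.trans hw.symm
    injection h3 with h4 _
    exact absurd h4 (by decide)
  | cons x xs =>
    have h3 : (x :: xs) ++ ['}'] = '{' :: u := by rw [hw, ← hu]; simp
    have hx : x = '{' ∧ xs ++ ['}'] = u := by simpa using h3
    have hs : s = '{' :: xs ++ ['}'] := by rw [← hw, hx.1]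
    rw [hs]
    simp [pvInner]

lemma hs_iff (m : List Char) : pvHasSpace m = true ↔ ' ' ∈ m := by
  rw [pvHasSpace, PySem.Chars.isIn_iff_infix]
  constructor
  · intro h; exact h.subset (List.mem_singleton.2 rfl)
  · intro h
    obtain ⟨s, t, hst⟩ := List.append_of_mem h
    exact ⟨s, t, by rw [hst]; simp⟩

lemma braced_shape (inner : List Char) : pvBraced ('{' :: inner ++ ['}']) = true := by
  rw [pvBraced, Bool.and_eq_true]
  exact ⟨(PySem.Chars.startswith_iff _ _).2 ⟨inner ++ ['}'], by simp⟩,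
    (PySem.Chars.endswith_iff _ _).2 ⟨'{' :: inner, by simp⟩⟩

lemma inner_shape (X : List Char) : pvInner ('{' :: X ++ ['}']) = X := by
  simp [pvInner]

lemma mergeA_decomp {a b : List Char} (ha : pvBraced a = true) (hb : pvBraced b = true) :
    pvMergeA a b = '{' :: (pvInner a ++ ',' :: pvInner b) ++ ['}'] := by
  rw [mergeA_eq]
  conv_lhs => rw [braced_decomp ha, braced_decomp hb]
  rw [show ('{' :: pvInner a ++ ['}']) = ('{' :: pvInner a) ++ ['}'] by simp,
    List.dropLast_concat]
  simp

lemma hs_eq_decide (m : List Char) : pvHasSpace m = decide (' ' ∈ m) := by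
  by_cases h : ' ' ∈ m
  · rw [(hs_iff m).2 h]; simp [h]
  · have h2 : pvHasSpace m ≠ true := fun hh => h ((hs_iff m).1 hh)
    have h3 : pvHasSpace m = false := Bool.eq_false_iff.mpr h2
    rw [h3]; simp [h]

lemma hs_shape (X Y : List Char) : pvHasSpace ('{' :: (X ++ ',' :: Y) ++ ['}'])
    = (pvHasSpace ('{' :: X ++ ['}']) || pvHasSpace ('{' :: Y ++ ['}'])) := by
  rw [hs_eq_decide, hs_eq_decide, hs_eq_decide, Bool.eq_iff_iff]
  simp only [decide_eq_true_eq, Bool.or_eq_true]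
  have h1 : ¬ (' ' = '{') := by decide
  have h2 : ¬ (' ' = '}') := by decide
  have h3 : ¬ (' ' = ',') := by decide
  simp only [List.mem_cons, List.mem_append]
  tauto

lemma braced_mergeA {a b : List Char} (ha : pvBraced a = true) (hb : pvBraced b = true) :
    pvBraced (pvMergeA a b) = true := by
  rw [mergeA_decomp ha hb]; exact braced_shape _

lemma inner_mergeA {a b : List Char} (ha : pvBraced a = true) (hb : pvBraced b = true) :
    pvInner (pvMergeA a b) = pvInner a ++ ',' :: pvInner b := by
  rw [mergeA_decomp ha hb, inner_shape]

lemma hs_mergeA {a b : List Char} (ha : pvBraced a = true) (hb : pvBraced b = true) :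
    pvHasSpace (pvMergeA a b) = (pvHasSpace a || pvHasSpace b) := by
  rw [mergeA_decomp ha hb, hs_shape]
  rw [← braced_decomp ha, ← braced_decomp hb]

-- ---- the tuple-stream characterisation (port's zips = pvTup) ----

lemma mergeList_cons (x y : List Char) (r : List (List Char)) :
    pvMergeList (x :: y :: r) = (pvBraced x && pvBraced y) :: pvMergeList (y :: r) := by
  simp [pvMergeList]

lemma mergeList_length (ms : List (List Char)) (h : ms ≠ []) :
    (pvMergeList ms).length = ms.length := by
  cases ms with
  | nil => exact absurd rfl h
  | cons a t => simp [pvMergeList]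

lemma mergeList_ne_nil (ms : List (List Char)) : pvMergeList ms ≠ [] := by
  simp [pvMergeList]

lemma rsLoop_append (L : List (List Char × Bool)) (m : List Char) (b : Bool) :
    ∀ a, pvRSLoop (L ++ [(m, b)]) a =
      pvRSLoop L a ++ [pvHasSpace m || (b && (pvRSLoop L a).getLastD a)] := by
  induction L with
  | nil => intro a; simp [pvRSLoop]
  | cons p L' ih =>
    intro a
    obtain ⟨m', b'⟩ := p
    simp only [List.cons_append, pvRSLoop, ih, List.getLastD_cons]

def pvRSList (ms : List (List Char)) : List Bool :=
  (pvRSLoop (ms.reverse.zip (pvMergeList ms).reverse) false).reverse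

lemma last_head {α : Type} (l : List α) (d : α) : l.getLastD d = l.reverse.headD d := by
  rw [List.getLastD_eq_getLast?, List.headD_eq_head?, List.head?_reverse]

lemma rsList_cons (x y : List Char) (r : List (List Char)) :
    pvRSList (x :: y :: r) =
      (pvHasSpace x || ((pvBraced x && pvBraced y) && (pvRSList (y :: r)).headD false))
        :: pvRSList (y :: r) := by
  have hlen : (y :: r).reverse.length = (pvMergeList (y :: r)).reverse.length := by
    simp [mergeList_length (y :: r) (by simp)]
  rw [pvRSList, show (x :: y :: r).reverse = (y :: r).reverse ++ [x] by simp,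
    mergeList_cons, show ((pvBraced x && pvBraced y) :: pvMergeList (y :: r)).reverse
      = (pvMergeList (y :: r)).reverse ++ [pvBraced x && pvBraced y] by simp,
    List.zip_append hlen]
  simp only [List.zip_cons_cons, List.zip_nil_right]
  rw [show (y :: r).reverse.zip (pvMergeList (y :: r)).reverse ++ [(x, pvBraced x && pvBraced y)]
      = (y :: r).reverse.zip (pvMergeList (y :: r)).reverse ++ [(x, pvBraced x && pvBraced y)] from rfl,
    rsLoop_append]
  rw [List.reverse_append, last_head]
  simp [pvRSList]

def pvZip4 (ms : List (List Char)) : List (List Char × Bool × Bool × Bool) :=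
  ms.zip ((false :: (pvMergeList ms).dropLast).zip ((pvMergeList ms).zip (pvRSList ms)))

lemma rs_head (ms : List (List Char)) :
    (pvRSList ms).headD false = pvRS4 (pvTup ms) := by
  induction ms with
  | nil => simp [pvRSList, pvMergeList, pvRSLoop, pvTup, pvRS4]
  | cons x ys ih =>
    cases ys with
    | nil => simp [pvRSList, pvMergeList, pvRSLoop, pvTup, pvRS4]
    | cons y r =>
      rw [rsList_cons]
      simp only [List.headD_cons, pvTup, pvRS4]
      rw [ih]
      rfl

lemma setL_zip_head (R : Bool) (y : List Char) (r : List (List Char))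
    (bl : List Bool) (rest : List (Bool × Bool)) :
    pvSetL R ((y :: r).zip ((false :: bl).zip rest)) =
      (y :: r).zip ((R :: bl).zip rest) := by
  cases rest with
  | nil => simp [pvSetL]
  | cons p ps => simp [pvSetL]

lemma tup_eq (ms : List (List Char)) : pvZip4 ms = pvTup ms := by
  induction ms with
  | nil => simp [pvZip4, pvTup]
  | cons x ys ih =>
    cases ys with
    | nil =>
      simp [pvZip4, pvTup, pvMergeList, pvRSList, pvRSLoop]
    | cons y r =>
      have hM := mergeList_ne_nil (y :: r)
      obtain ⟨M0, Mt, hMe⟩ : ∃ M0 Mt, pvMergeList (y :: r) = M0 :: Mt :=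
        List.exists_cons_of_ne_nil hM
      rw [pvZip4, mergeList_cons, rsList_cons]
      simp only [List.dropLast_cons_of_ne_nil hM]
      rw [pvTup]
      rw [← rs_head, ← ih]
      rw [pvZip4]
      simp only [List.zip_cons_cons]
      congr 1
      exact (setL_zip_head _ y r _ _).symm

-- ---- the emission lemmas (M/E) and the bridge (CB) ----

lemma dropLast_braced {a : List Char} (ha : pvBraced a = true) :
    a.dropLast = '{' :: pvInner a := by
  conv_lhs => rw [braced_decomp ha]
  rw [show ('{' :: pvInner a ++ ['}']) = ('{' :: pvInner a) ++ ['}'] by simp,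
    List.dropLast_concat]

lemma rs4_tup_cons (x : List Char) (ys : List (List Char)) :
    pvRS4 (pvTup (x :: ys)) =
      (pvHasSpace x || ((pvBraced x && pvBracedHead ys) && pvRS4 (pvTup ys))) := by
  cases ys with
  | nil => simp [pvTup, pvRS4, pvBracedHead]
  | cons y r => simp [pvTup, pvRS4, pvBracedHead]

lemma mergeFrom_ne_nil (ms : List (List Char)) : ∀ prev, pvMergeFrom prev ms ≠ [] := by
  induction ms with
  | nil => intro prev; simp [pvMergeFrom]
  | cons c cs ih =>
    intro prev
    rw [pvMergeFrom]
    split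
    · exact ih _
    · simp

lemma wrap_open_close (m : List Char) :
    (if pvHasSpace m then ['{'] else []) ++ m ++ (if pvHasSpace m then ['}'] else [])
      = pvWrap m := by
  by_cases h : pvHasSpace m <;> simp [pvWrap, h]

lemma setL_false_tup (ms : List (List Char)) : pvSetL false (pvTup ms) = pvTup ms := by
  cases ms with
  | nil => rfl
  | cons x ys => cases ys with
    | nil => rfl
    | cons y r => rfl

lemma pvCont_merge {p : List Char} {ms' : List (List Char)} {w : Bool}
    (hp : pvBraced p = true) (hh : pvBracedHead ms' = true) :
    pvCont w (p :: ms') = ',' :: pvInner p ++ pvCont w ms' := by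
  simp only [pvCont, hp, hh, Bool.true_and, if_true]

lemma pvCont_stop {p : List Char} {ms' : List (List Char)} (w : Bool)
    (hh : pvBracedHead ms' = false) :
    pvCont w (p :: ms') = ',' :: p.tail ++ (if w then ['}'] else [])
      ++ (if ms' = [] then [] else '|' :: pvTT ms') := by
  simp only [pvCont, hh, Bool.and_false, Bool.false_eq_true, if_false]

lemma emitB_mid (m : List Char) (right sp : Bool) (rest : List (List Char × Bool × Bool × Bool))
    (pieces : List (List Char)) (w : Bool) :
    pvEmitB ((m, true, right, sp) :: rest) pieces w =
      pvEmitB rest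
        (if !right && w
          then (pieces ++ [[',']]) ++ [if right then m.tail.dropLast else m.tail] ++ [['}']]
          else (pieces ++ [[',']]) ++ [if right then m.tail.dropLast else m.tail]) w := rfl

lemma emitB_start (m : List Char) (right sp : Bool) (rest : List (List Char × Bool × Bool × Bool))
    (pieces : List (List Char)) (w : Bool) :
    pvEmitB ((m, false, right, sp) :: rest) pieces w =
      pvEmitB rest
        (if !right && sp
          then ((if sp then (if pieces ≠ [] then pieces ++ [['|']] else pieces) ++ [['{']]
                  else (if pieces ≠ [] then pieces ++ [['|']] else pieces))
                ++ [if right then m.dropLast else m]) ++ [['}']]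
          else (if sp then (if pieces ≠ [] then pieces ++ [['|']] else pieces) ++ [['{']]
                  else (if pieces ≠ [] then pieces ++ [['|']] else pieces))
                ++ [if right then m.dropLast else m]) sp := rfl

lemma cont_bridge (ms : List (List Char)) : ∀ (prev : List Char) (w : Bool),
    pvBraced prev = true → pvBracedHead ms = true →
    w = (pvHasSpace prev || pvRS4 (pvTup ms)) →
    (if w then ['{'] else []) ++ prev.dropLast ++ pvCont w ms =
      PySem.Chars.join ['|'] ((pvMergeFrom prev ms).map pvWrap) := by
  induction ms with
  | nil => intro prev w _ hh _; simp [pvBracedHead] at hh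
  | cons p ms' ih =>
    intro prev w hprev hh hw
    have hp : pvBraced p = true := by simpa [pvBracedHead] using hh
    have hcondA : (pvBraced prev && pvBraced p) = true := by rw [hprev, hp]; rfl
    rw [pvMergeFrom, if_pos hcondA]
    by_cases hh' : pvBracedHead ms' = true
    · have hw' : w = (pvHasSpace (pvMergeA prev p) || pvRS4 (pvTup ms')) := by
        rw [hw, rs4_tup_cons, hs_mergeA hprev hp, hp, hh']
        simp [Bool.or_assoc]
      rw [← ih (pvMergeA prev p) w (braced_mergeA hprev hp) hh' hw']
      rw [pvCont_merge hp hh']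
      rw [dropLast_braced (braced_mergeA hprev hp), inner_mergeA hprev hp,
        dropLast_braced hprev]
      simp
    · have hhf : pvBracedHead ms' = false := by simpa using hh'
      have hw2 : w = pvHasSpace (pvMergeA prev p) := by
        rw [hw, rs4_tup_cons, hs_mergeA hprev hp, hp, hhf]
        simp
      rw [pvCont_stop w hhf]
      cases ms' with
      | nil =>
        rw [show pvMergeFrom (pvMergeA prev p) [] = [pvMergeA prev p] from rfl]
        rw [List.map_singleton, PySem.Chars.join_singleton]
        rw [← wrap_open_close (pvMergeA prev p), ← hw2, mergeA_eq]
        simp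
      | cons q r =>
        have hq : pvBraced q = false := by simpa [pvBracedHead] using hhf
        rw [show pvMergeFrom (pvMergeA prev p) (q :: r)
            = pvMergeA prev p :: pvMergeFrom q r by
          rw [pvMergeFrom, if_neg (by rw [hq]; simp)]]
        obtain ⟨a, l, hal⟩ : ∃ a l, pvMergeFrom q r = a :: l := by
          cases hql : pvMergeFrom q r with
          | nil => exact absurd hql (mergeFrom_ne_nil r q)
          | cons a l => exact ⟨a, l, rfl⟩
        rw [hal, List.map_cons, List.map_cons, PySem.Chars.join_cons_cons]
        rw [← wrap_open_close (pvMergeA prev p), ← hw2, mergeA_eq]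
        rw [show pvTT (q :: r) = PySem.Chars.join ['|'] ((pvMergeFrom q r).map pvWrap) from rfl,
          hal, List.map_cons]
        simp

lemma pvTT_single (x : List Char) : pvTT [x] = pvWrap x := by
  simp [pvTT, pvML, pvMergeFrom, PySem.Chars.join_singleton]

lemma pvTT_cons_unmerged (x y : List Char) (r : List (List Char))
    (hR : (pvBraced x && pvBraced y) = false) :
    pvTT (x :: y :: r) = pvWrap x ++ '|' :: pvTT (y :: r) := by
  rw [pvTT, show pvML (x :: y :: r) = pvMergeFrom x (y :: r) from rfl,
    pvMergeFrom, if_neg (by rw [hR]; simp)]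
  obtain ⟨a, l, hal⟩ : ∃ a l, pvMergeFrom y r = a :: l := by
    cases hql : pvMergeFrom y r with
    | nil => exact absurd hql (mergeFrom_ne_nil r y)
    | cons a l => exact ⟨a, l, rfl⟩
  rw [hal, List.map_cons, List.map_cons, PySem.Chars.join_cons_cons]
  rw [show pvTT (y :: r) = PySem.Chars.join ['|'] ((pvMergeFrom y r).map pvWrap) from rfl,
    hal, List.map_cons]
  simp

lemma tup_cons_cons (x y : List Char) (r : List (List Char)) :
    pvTup (x :: y :: r) =
      (x, false, pvBraced x && pvBraced y,
        pvHasSpace x || ((pvBraced x && pvBraced y) && pvRS4 (pvTup (y :: r))))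
        :: pvSetL (pvBraced x && pvBraced y) (pvTup (y :: r)) := rfl

-- the main induction: E (run start) and M (mid-run) statements together, on the length
lemma emit_main (n : ℕ) : ∀ (ms : List (List Char)), ms.length ≤ n →
    (∀ (pieces : List (List Char)) (w : Bool),
      (pvEmitB (pvTup ms) pieces w).flatten =
        pieces.flatten ++ (if ms = [] then []
          else (if pieces = [] then [] else ['|']) ++ pvTT ms)) ∧
    (∀ (pieces : List (List Char)) (w : Bool), pvBracedHead ms = true →
      (pvEmitB (pvSetL true (pvTup ms)) pieces w).flatten =
        pieces.flatten ++ pvCont w ms) := by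
  induction n with
  | zero =>
    intro ms hlen
    have hms : ms = [] := List.length_eq_zero_iff.mp (Nat.le_zero.mp hlen)
    subst hms
    constructor
    · intro pieces w; simp [pvTup, pvEmitB]
    · intro pieces w hh; simp [pvBracedHead] at hh
  | succ n ih =>
    intro ms hlen
    constructor
    · -- E: run start
      intro pieces w
      cases ms with
      | nil => simp [pvTup, pvEmitB]
      | cons x ys =>
        cases ys with
        | nil =>
          rw [show pvTup [x] = [(x, false, false, pvHasSpace x)] from rfl,
            emitB_start, pvTT_single]
          by_cases hsx : pvHasSpace x = true
          · by_cases hp0 : pieces = [] <;> simp [pvEmitB, hsx, hp0, pvWrap]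
          · have hsx' : pvHasSpace x = false := by simpa using hsx
            by_cases hp0 : pieces = [] <;> simp [pvEmitB, hsx', hp0, pvWrap]
        | cons y r =>
          have hys : (y :: r).length ≤ n := by
            simp only [List.length_cons] at hlen ⊢; omega
          rw [tup_cons_cons]
          by_cases hR : (pvBraced x && pvBraced y) = true
          · -- x starts a merged run
            have hby : pvBracedHead (y :: r) = true := by
              simpa [pvBracedHead] using (Bool.and_eq_true_iff.mp hR).2
            rw [hR, emitB_start]
            simp only [Bool.not_true, Bool.false_and, Bool.false_eq_true, if_false, if_true]
            rw [(ih (y :: r) hys).2 _ _ hby]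
            rw [if_neg (by simp : ¬(x :: y :: r) = [])]
            have hcb := cont_bridge (y :: r) x
              (pvHasSpace x || (true && pvRS4 (pvTup (y :: r))))
              (Bool.and_eq_true_iff.mp hR).1 hby (by simp)
            rw [show pvTT (x :: y :: r)
                = PySem.Chars.join ['|'] ((pvMergeFrom x (y :: r)).map pvWrap) from rfl, ← hcb]
            rw [dropLast_braced (Bool.and_eq_true_iff.mp hR).1]
            by_cases hs1 : pvHasSpace x = true <;>
              by_cases hs2 : pvRS4 (pvTup (y :: r)) = true <;>
                by_cases hp0 : pieces = [] <;>
                  simp [hs1, hs2, hp0]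
          · -- x stands alone
            have hRf : (pvBraced x && pvBraced y) = false := by simpa using hR
            rw [hRf, emitB_start, setL_false_tup]
            simp only [Bool.false_and, Bool.or_false, Bool.not_false, Bool.true_and,
              Bool.false_eq_true, if_false]
            rw [(ih (y :: r) hys).1]
            rw [if_neg (by simp : ¬(x :: y :: r) = []), if_neg (by simp : ¬(y :: r) = [])]
            rw [pvTT_cons_unmerged x y r hRf]
            by_cases hsx : pvHasSpace x = true <;>
              by_cases hp0 : pieces = [] <;>
                simp [hsx, hp0, pvWrap]
    · -- M: mid-run
      intro pieces w hh
      cases ms with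
      | nil => simp [pvBracedHead] at hh
      | cons p ms' =>
        have hp : pvBraced p = true := by simpa [pvBracedHead] using hh
        cases ms' with
        | nil =>
          rw [show pvSetL true (pvTup [p]) = [(p, true, false, pvHasSpace p)] from rfl,
            emitB_mid, pvCont_stop w (by simp [pvBracedHead])]
          by_cases hw' : w = true
          · simp [pvEmitB, hw']
          · have hw'' : w = false := by simpa using hw'
            simp [pvEmitB, hw'']
        | cons q r =>
          have hms' : (q :: r).length ≤ n := by
            simp only [List.length_cons] at hlen ⊢; omega
          rw [show pvSetL true (pvTup (p :: q :: r)) =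
              (p, true, pvBraced p && pvBraced q,
                pvHasSpace p || ((pvBraced p && pvBraced q) && pvRS4 (pvTup (q :: r))))
                :: pvSetL (pvBraced p && pvBraced q) (pvTup (q :: r)) by
            rw [tup_cons_cons]; rfl]
          by_cases hR : (pvBraced p && pvBraced q) = true
          · have hbq : pvBracedHead (q :: r) = true := by
              simpa [pvBracedHead] using (Bool.and_eq_true_iff.mp hR).2
            rw [hR, emitB_mid]
            simp only [Bool.not_true, Bool.false_and, Bool.false_eq_true, if_false, if_true]
            rw [(ih (q :: r) hms').2 _ _ hbq]
            rw [pvCont_merge hp hbq]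
            simp [pvInner]
          · have hRf : (pvBraced p && pvBraced q) = false := by simpa using hR
            have hbq : pvBracedHead (q :: r) = false := by
              rcases Bool.and_eq_false_iff.mp hRf with h | h
              · exact absurd hp (by simp [h])
              · simpa [pvBracedHead] using h
            rw [hRf, emitB_mid, setL_false_tup]
            simp only [Bool.not_false, Bool.true_and, Bool.false_eq_true, if_false]
            rw [(ih (q :: r) hms').1]
            rw [pvCont_stop w hbq]
            rw [if_neg (by simp : ¬(q :: r) = [])]
            by_cases hw' : w = true
            · simp [hw']
            · have hw'' : w = false := by simpa using hw'
              simp [hw'']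

lemma altB_eq (ms : List (List Char)) :
    pvEmitB (ms.zip ((false :: (pvMergeList ms).dropLast).zip
        ((pvMergeList ms).zip ((pvRSLoop (ms.reverse.zip (pvMergeList ms).reverse) false).reverse))))
      [] false = pvEmitB (pvTup ms) [] false := by
  rw [← tup_eq]; rfl

-- ===== VERDICT (by name: the statement is the Claim_ definition above) =====
theorem join_union_metavars_spec : Claim_equal_join_union_metavars := by
  intro metavars _ hpre
  unfold Spec_join_union_metavars join_union_metavars join_union_metavars_alt
  cases hm : metavars.map String.toList with
  | nil => exact absurd (by simpa using hm) hpre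
  | cons m0 rest =>
    show String.ofList (PySem.Chars.join ['|']
        (List.map pvWrap (List.foldl pvStepA [m0] rest).reverse))
      = String.ofList (pvEmitB ((m0 :: rest).zip
          ((false :: (pvMergeList (m0 :: rest)).dropLast).zip
            ((pvMergeList (m0 :: rest)).zip
              ((pvRSLoop ((m0 :: rest).reverse.zip (pvMergeList (m0 :: rest)).reverse)
                false).reverse)))) [] false).flatten
    rw [foldA_eq, List.append_nil, List.reverse_reverse, altB_eq]
    rw [(emit_main (m0 :: rest).length (m0 :: rest) le_rfl).1 [] false]
    rw [if_neg (by simp : ¬(m0 :: rest) = [])]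
    simp [pvTT, pvML]
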